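-- pv_equiv track=rewrite | github.com/iknoom/Problem_Solving | BOJ/ICPC/2017 Daejeon Regional/I_14959.py | solve
-- ===== SOURCE A (Python) =====
-- def solve(arr, N):
--     k = N - 1
--     p = 1
--     j = 0
--     fail = [0] * N
--     for i in range(1, N):
--         while j > 0 and arr[i] != arr[j]: j = fail[j - 1]
--         if arr[i] == arr[j]: j += 1; fail[i] = j
--         if (k + p) > (N - fail[i]):
--             k, p = N - 1 - i, i - fail[i] + 1
--     return k, p
-- ===== SOURCE B (Python) =====
-- def solve(arr, N):
--     # B: no failure-function recurrence — for each prefix find its longest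
--     # proper border by direct slice comparison (longest candidate first),
--     # then select the first maximal border in a separate pass.
--     def border(i):
--         for L in range(i, 0, -1):
--             if arr[:L] == arr[i - L + 1:i + 1]:
--                 return L
--         return 0
--     borders = [border(i) for i in range(1, N)]
--     m = max(borders, default=0)
--     if m == 0:
--         return N - 1, 1
--     i = borders.index(m) + 1
--     return N - 1 - i, i - m + 1
-- ===== Notes on version B (the rewrite author's own statement) =====
-- stated objective: alternative
-- what changed: A computes borders with the KMP failure-function recurrence fused with online best tracking; B abandons the recurrence entirely and finds each prefix's longest proper border by direct slice comparison (longest candidate first), then picks the first maximal border in a separate max+index pass.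
import Mathlib
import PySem

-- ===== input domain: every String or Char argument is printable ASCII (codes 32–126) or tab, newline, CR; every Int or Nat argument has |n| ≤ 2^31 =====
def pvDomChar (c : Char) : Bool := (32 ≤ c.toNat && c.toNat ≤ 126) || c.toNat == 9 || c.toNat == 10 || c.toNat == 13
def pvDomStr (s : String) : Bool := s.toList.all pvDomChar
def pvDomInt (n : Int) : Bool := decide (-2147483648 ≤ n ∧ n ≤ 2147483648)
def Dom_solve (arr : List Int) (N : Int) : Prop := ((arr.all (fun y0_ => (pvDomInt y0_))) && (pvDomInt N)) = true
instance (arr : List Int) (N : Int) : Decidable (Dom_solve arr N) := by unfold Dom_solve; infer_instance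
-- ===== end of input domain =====

-- A computes each prefix's longest proper border with the KMP failure-function recurrence,
-- fused with online best tracking; B drops the recurrence entirely and finds each border by
-- direct slice comparison (longest candidate first), then selects the first maximal border
-- in a separate pass (alternative algorithm; B is slower than A but structurally independent
-- of the failure-function recurrence).

-- ===== PORT A =====
-- the inner `while j > 0 and arr[i] != arr[j]: j = fail[j - 1]`; fuel only makes it
-- total (on inputs where Python terminates, j strictly decreases, so fuel = j suffices)
def pvWhile (arr fail : List Int) (ai : Int) : Nat → Int → Int
  | 0, j => j
  | fuel + 1, j =>
    if 0 < j ∧ ai ≠ PySem.List.pyGetD arr j 0 then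
      pvWhile arr fail ai fuel (PySem.List.pyGetD fail (j - 1) 0)
    else j

-- one iteration of A's fused loop, state ((k, p), (j, fail))
def stepA (arr : List Int) (N : Int) (s : (Int × Int) × Int × List Int) (i : Int) :
    (Int × Int) × Int × List Int :=
  let j := pvWhile arr s.2.2 (PySem.List.pyGetD arr i 0) s.2.1.toNat s.2.1
  let jf : Int × List Int :=
    if PySem.List.pyGetD arr i 0 = PySem.List.pyGetD arr j 0 then
      (j + 1, PySem.List.pySetD s.2.2 i (j + 1))
    else (j, s.2.2)
  if s.1.1 + s.1.2 > N - PySem.List.pyGetD jf.2 i 0 then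
    ((N - 1 - i, i - PySem.List.pyGetD jf.2 i 0 + 1), jf)
  else (s.1, jf)

def solve (arr : List Int) (N : Int) : Int × Int :=
  ((PySem.List.pyRange 1 N 1).foldl (stepA arr N) ((N - 1, 1), 0, List.replicate N.toNat 0)).1

-- ===== PORT B =====
-- Source B's `for L in range(i, 0, -1): if arr[:L] == arr[i-L+1:i+1]: return L` / `return 0`,
-- as recursion on the countdown: n + 1 is the candidate L currently tried
def borderLoop (arr : List Int) (i : Int) : Nat → Int
  | 0 => 0
  | n + 1 =>
    let L : Int := (n : Int) + 1
    if PySem.List.slice arr none (some L) =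
        PySem.List.slice arr (some (i - L + 1)) (some (i + 1)) then L
    else borderLoop arr i n

def border (arr : List Int) (i : Int) : Int := borderLoop arr i i.toNat

def solve_alt (arr : List Int) (N : Int) : Int × Int :=
  let borders := (PySem.List.pyRange 1 N 1).map (border arr)
  let m := PySem.List.maxD borders (fun x => x) 0
  if m = 0 then (N - 1, 1)
  else
    let i : Int := (((PySem.List.index? borders m).getD 0 : Nat) : Int) + 1
    (N - 1 - i, i - m + 1)

-- ===== PRECONDITION & SPEC =====
-- Pre_ excludes exactly the inputs where Python A raises IndexError: arr[i] is read for
-- i in range(1, N), so A raises iff N ≥ 2 and N > len(arr).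
def Pre_solve (arr : List Int) (N : Int) : Prop := N ≤ 1 ∨ N ≤ (arr.length : Int)
instance (arr : List Int) (N : Int) : Decidable (Pre_solve arr N) := by unfold Pre_solve; infer_instance
def pvWitness_solve : List Int × Int := ([1, 2, 1, 1, 2], 5)
def Spec_solve (arr : List Int) (N : Int) (out : Int × Int) : Prop := out = solve_alt arr N
instance (arr : List Int) (N : Int) (out : Int × Int) : Decidable (Spec_solve arr N out) := by unfold Spec_solve; infer_instance

-- ===== CLAIM (what is proved, stated in full; the proofs are below) =====
def Claim_equal_solve : Prop := ∀ (arr : List Int) (N : Int), Dom_solve arr N → Pre_solve arr N → Spec_solve arr N (solve arr N)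

-- ===== LEMMAS AND PROOFS =====

-- A's failure-table construction, split off from the fused fold for analysis
def stepB (arr : List Int) (s : Int × List Int) (i : Int) : Int × List Int :=
  let j := pvWhile arr s.2 (PySem.List.pyGetD arr i 0) s.1.toNat s.1
  if PySem.List.pyGetD arr i 0 = PySem.List.pyGetD arr j 0 then
    (j + 1, PySem.List.pySetD s.2 i (j + 1))
  else (j, s.2)

def failTable (arr : List Int) (N : Int) : List Int :=
  ((PySem.List.pyRange 1 N 1).foldl (stepB arr) (0, List.replicate N.toNat 0)).2

-- A's book-keeping step on (k, p), reading a fixed failure table f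
def selStep (N : Int) (f : List Int) (kp : Int × Int) (i : Int) : Int × Int :=
  if kp.1 + kp.2 > N - PySem.List.pyGetD f i 0 then
    (N - 1 - i, i - PySem.List.pyGetD f i 0 + 1)
  else kp

-- invariants of the (j, fail) state
def InvF (N : Int) (s : Int × List Int) : Prop :=
  0 ≤ s.1 ∧ s.2.length = N.toNat ∧ (∀ x ∈ s.2, 0 ≤ x) ∧ s.2.getD 0 0 = 0

theorem pyGetD_nonneg (f : List Int) (i : Int) (h : ∀ x ∈ f, 0 ≤ x) :
    0 ≤ PySem.List.pyGetD f i 0 := by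
  unfold PySem.List.pyGetD
  cases hg : PySem.List.pyGet? f i with
  | none => simp
  | some x =>
    simp only [Option.getD_some]
    exact h x (PySem.List.mem_of_pyGet?_eq_some f hg)

theorem pvWhile_nonneg (arr f : List Int) (ai : Int) (fuel : Nat) (j : Int)
    (hf : ∀ x ∈ f, 0 ≤ x) (hj : 0 ≤ j) : 0 ≤ pvWhile arr f ai fuel j := by
  induction fuel generalizing j with
  | zero => exact hj
  | succ fuel ih =>
    unfold pvWhile
    split
    · exact ih _ (pyGetD_nonneg f _ hf)
    · exact hj

theorem stepA_snd (arr : List Int) (N : Int) (s : (Int × Int) × Int × List Int) (i : Int) :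
    (stepA arr N s i).2 = stepB arr s.2 i := by
  simp only [stepA, stepB]
  split <;> split <;> rfl

theorem stepA_fst (arr : List Int) (N : Int) (s : (Int × Int) × Int × List Int) (i : Int) :
    (stepA arr N s i).1 = selStep N (stepB arr s.2 i).2 s.1 i := by
  simp only [stepA, stepB, selStep]
  split <;> split <;> rfl

theorem foldA_snd (arr : List Int) (N : Int) (l : List Int) :
    ∀ (s : (Int × Int) × Int × List Int),
      (l.foldl (stepA arr N) s).2 = l.foldl (stepB arr) s.2 := by
  induction l with
  | nil => intro s; rfl
  | cons x l ih =>
    intro s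
    simp only [List.foldl_cons]
    rw [ih, stepA_snd]

theorem pyGetD_pySetD_ne (f : List Int) (x i v : Int) (hx : 0 ≤ x) (hi : 0 ≤ i) (hne : x ≠ i) :
    PySem.List.pyGetD (PySem.List.pySetD f x v) i 0 = PySem.List.pyGetD f i 0 := by
  rw [PySem.List.pySetD_of_nonneg f v hx, PySem.List.pyGetD_of_nonneg _ 0 hi,
    PySem.List.pyGetD_of_nonneg f 0 hi, List.getD_eq_getElem?_getD, List.getD_eq_getElem?_getD,
    List.getElem?_set_ne (by omega : x.toNat ≠ i.toNat)]

theorem stepB_freeze (arr : List Int) (s : Int × List Int) (x i : Int)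
    (hx : 0 ≤ x) (hi : 0 ≤ i) (hne : x ≠ i) :
    PySem.List.pyGetD (stepB arr s x).2 i 0 = PySem.List.pyGetD s.2 i 0 := by
  simp only [stepB]
  split
  · exact pyGetD_pySetD_ne _ _ _ _ hx hi hne
  · rfl

theorem foldB_freeze (arr : List Int) (l : List Int) :
    ∀ (s : Int × List Int) (i : Int), 0 ≤ i → (∀ x ∈ l, 0 ≤ x ∧ x ≠ i) →
      PySem.List.pyGetD (l.foldl (stepB arr) s).2 i 0 = PySem.List.pyGetD s.2 i 0 := by
  induction l with
  | nil => intro s i _ _; rfl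
  | cons x l ih =>
    intro s i hi hl
    simp only [List.foldl_cons]
    rw [ih _ _ hi (fun y hy => hl y (List.mem_cons_of_mem _ hy)),
      stepB_freeze arr s x i (hl x List.mem_cons_self).1 hi (hl x List.mem_cons_self).2]

theorem stepB_inv (arr : List Int) (N : Int) (s : Int × List Int) (i : Int)
    (h : InvF N s) (hi : 1 ≤ i) : InvF N (stepB arr s i) := by
  obtain ⟨hj, hlen, hpos, h0⟩ := h
  simp only [stepB]
  have hw : 0 ≤ pvWhile arr s.2 (PySem.List.pyGetD arr i 0) s.1.toNat s.1 :=
    pvWhile_nonneg _ _ _ _ _ hpos hj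
  split
  · refine ⟨by dsimp only; omega, ?_, ?_, ?_⟩
    · dsimp only
      rw [PySem.List.pySetD_of_nonneg _ _ (by omega : (0:Int) ≤ i)]
      simpa using hlen
    · dsimp only
      intro x hx
      rw [PySem.List.pySetD_of_nonneg _ _ (by omega : (0:Int) ≤ i)] at hx
      rcases List.mem_or_eq_of_mem_set hx with h | h
      · exact hpos x h
      · omega
    · dsimp only
      rw [PySem.List.pySetD_of_nonneg _ _ (by omega : (0:Int) ≤ i),
        List.getD_eq_getElem?_getD, List.getElem?_set_ne (by omega : i.toNat ≠ 0),
        ← List.getD_eq_getElem?_getD]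
      exact h0
  · exact ⟨hw, hlen, hpos, h0⟩

theorem foldB_inv (arr : List Int) (N : Int) (l : List Int) :
    ∀ (s : Int × List Int), (∀ x ∈ l, 1 ≤ x) → InvF N s → InvF N (l.foldl (stepB arr) s) := by
  induction l with
  | nil => intro s _ h; exact h
  | cons x l ih =>
    intro s hl h
    exact ih _ (fun y hy => hl y (List.mem_cons_of_mem _ hy))
      (stepB_inv arr N s x h (hl x List.mem_cons_self))

theorem failTable_inv (arr : List Int) (N : Int) :
    (failTable arr N).length = N.toNat ∧ (∀ x ∈ failTable arr N, 0 ≤ x) ∧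
      (failTable arr N).getD 0 0 = 0 := by
  have h := foldB_inv arr N (PySem.List.pyRange 1 N 1)
    (0, List.replicate N.toNat 0)
    (fun x hx => ((PySem.List.mem_pyRange_one).1 hx).1)
    ⟨le_refl 0, by simp, by intro x hx; simp at hx; omega, by cases N.toNat <;> simp⟩
  exact ⟨h.2.1, h.2.2.1, h.2.2.2⟩

-- kp-sum stays above N - m as long as every read value is < m
theorem selFold_sum_gt (N m : Int) (f : List Int) (l : List Int) :
    ∀ (kp : Int × Int), (∀ i ∈ l, PySem.List.pyGetD f i 0 < m) →
      N - m < kp.1 + kp.2 →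
      N - m < (l.foldl (selStep N f) kp).1 + (l.foldl (selStep N f) kp).2 := by
  induction l with
  | nil => intro kp _ h; exact h
  | cons x l ih =>
    intro kp hl h
    simp only [List.foldl_cons]
    refine ih _ (fun y hy => hl y (List.mem_cons_of_mem _ hy)) ?_
    have hx := hl x List.mem_cons_self
    simp only [selStep]
    split <;> simp <;> omega

-- kp is a fixpoint once kp-sum = N - m and every read value is ≤ m
theorem selFold_fix (N m : Int) (f : List Int) (l : List Int) :
    ∀ (kp : Int × Int), (∀ i ∈ l, PySem.List.pyGetD f i 0 ≤ m) →
      kp.1 + kp.2 = N - m → l.foldl (selStep N f) kp = kp := by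
  induction l with
  | nil => intro kp _ _; rfl
  | cons x l ih =>
    intro kp hl h
    have hx := hl x List.mem_cons_self
    have hstep : selStep N f kp x = kp := by
      simp only [selStep]
      split
      · omega
      · rfl
    simp only [List.foldl_cons, hstep]
    exact ih _ (fun y hy => hl y (List.mem_cons_of_mem _ hy)) h

theorem selStep_congr (N : Int) (f g : List Int) (kp : Int × Int) (i : Int)
    (h : PySem.List.pyGetD f i 0 = PySem.List.pyGetD g i 0) :
    selStep N f kp i = selStep N g kp i := by
  simp only [selStep, h]

-- A's fused fold equals the pure selection fold over the final failure table
theorem foldA_eq_selFold (arr : List Int) (N b : Int) (hb1 : 1 ≤ b) (hbN : b ≤ N) :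
    ((PySem.List.pyRange 1 b 1).foldl (stepA arr N) ((N - 1, 1), 0, List.replicate N.toNat 0)).1
      = (PySem.List.pyRange 1 b 1).foldl (selStep N (failTable arr N)) (N - 1, 1) := by
  induction b, hb1 using Int.le_induction with
  | base =>
    rw [PySem.List.pyRange_one_eq_nil (le_refl 1)]
    rfl
  | succ b hb ih =>
    have hbN' : b ≤ N := by omega
    rw [PySem.List.pyRange_one_succ_right hb, List.foldl_append, List.foldl_append]
    simp only [List.foldl_cons, List.foldl_nil]
    rw [stepA_fst, ih hbN']
    refine selStep_congr N _ _ _ _ ?_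
    -- the entry at b is already final after processing b
    have hsplit : PySem.List.pyRange 1 N 1
        = PySem.List.pyRange 1 (b + 1) 1 ++ PySem.List.pyRange (b + 1) N 1 :=
      PySem.List.pyRange_one_append 1 (b + 1) N (by omega) (by omega)
    have hfb : (stepB arr (((PySem.List.pyRange 1 b 1).foldl (stepA arr N)
        ((N - 1, 1), 0, List.replicate N.toNat 0)).2) b)
        = (PySem.List.pyRange 1 (b + 1) 1).foldl (stepB arr) (0, List.replicate N.toNat 0) := by
      rw [foldA_snd, PySem.List.pyRange_one_succ_right hb, List.foldl_append]
      rfl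
    rw [hfb]
    unfold failTable
    rw [hsplit, List.foldl_append]
    rw [foldB_freeze arr (PySem.List.pyRange (b + 1) N 1)
      ((PySem.List.pyRange 1 (b + 1) 1).foldl (stepB arr) (0, List.replicate N.toNat 0)) b
      (by omega)
      (fun x hx => ⟨by have := (PySem.List.mem_pyRange_one.1 hx).1; omega,
        by have := (PySem.List.mem_pyRange_one.1 hx).1; omega⟩)]

-- the selection fold over a fixed table equals B's max + first-index selection on its tail
theorem selFold_eq_select (N : Int) (f : List Int)
    (hlen : f.length = N.toNat) (hpos : ∀ x ∈ f, 0 ≤ x) (h0 : f.getD 0 0 = 0) :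
    (PySem.List.pyRange 1 N 1).foldl (selStep N f) (N - 1, 1)
      = (let m := PySem.List.maxD f.tail (fun x => x) 0;
         if m = 0 then (N - 1, 1)
         else
           let i : Int := (((PySem.List.index? f.tail m).getD 0 : Nat) : Int) + 1;
           (N - 1 - i, i - m + 1)) := by
  have hlen' : (f.length : Int) = N.toNat := by omega
  cases hmax : PySem.List.max? f.tail (fun x => x) with
  | none =>
    -- the tail is empty, so f has at most one entry and the range is empty
    have htail : f.tail = [] := (PySem.List.max?_eq_none_iff _ _).1 hmax
    have hN : N ≤ 1 := by
      have : f.length ≤ 1 := by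
        cases f with
        | nil => simp
        | cons a t => simp at htail; simp [htail]
      omega
    rw [PySem.List.pyRange_one_eq_nil hN]
    simp [PySem.List.maxD, hmax]
  | some m =>
    have hmD : PySem.List.maxD f.tail (fun x => x) 0 = m := by simp [PySem.List.maxD, hmax]
    have hub : ∀ y ∈ f.tail, y ≤ m := PySem.List.max?_isMax hmax
    have hmemt : m ∈ f.tail := PySem.List.max?_mem hmax
    have hmem : m ∈ f := List.mem_of_mem_tail hmemt
    have hm0 : 0 ≤ m := hpos m hmem
    have hfpos : 0 < f.length := by
      cases f with
      | nil => simp at hmem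
      | cons a t => simp
    have htailmem : ∀ (k : Nat) (hk : k < f.length), 1 ≤ k → f[k] ∈ f.tail := by
      intro k hk h1
      have h2 : k - 1 < f.tail.length := by rw [List.length_tail]; omega
      have he : f.tail[k - 1]'h2 = f[k]'hk := by
        rw [List.getElem_tail]
        congr 1
        omega
      exact he ▸ List.getElem_mem h2
    have hread : ∀ (i : Int) (h1 : 1 ≤ i) (h2 : i < N),
        PySem.List.pyGetD f i 0 = f[i.toNat]'(by omega) := by
      intro i h1 h2
      exact PySem.List.pyGetD_eq_getElem f 0 (by omega) (by omega)
    have hle : ∀ i ∈ PySem.List.pyRange 1 N 1, PySem.List.pyGetD f i 0 ≤ m := by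
      intro i hi
      obtain ⟨h1, h2⟩ := PySem.List.mem_pyRange_one.1 hi
      rw [hread i h1 h2]
      exact hub _ (htailmem i.toNat (by omega) (by omega))
    rw [hmD]
    by_cases hmz : m = 0
    · subst hmz
      rw [selFold_fix N 0 f _ _ (by simpa using hle) (by ring)]
      simp
    · -- m > 0: A's fold updates exactly at the first tail index attaining m
      simp only [if_neg hmz]
      obtain ⟨k1, hk1eq⟩ := Option.isSome_iff_exists.1
        ((PySem.List.index?_isSome_iff f.tail m).2 hmemt)
      obtain ⟨hk1lt, hk1val, hk1first⟩ := PySem.List.getElem_of_index?_eq_some hk1eq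
      have hf0 : f[0]'hfpos = 0 := by
        have := h0
        rw [List.getD_eq_getElem?_getD, List.getElem?_eq_getElem hfpos] at this
        simpa using this
      have hk0lt : k1 + 1 < f.length := by
        rw [List.length_tail] at hk1lt
        omega
      have hk0val : f[k1 + 1]'hk0lt = m := by
        rw [← List.getElem_tail (h := hk1lt)]
        exact hk1val
      have hk0first : ∀ j, j < k1 + 1 → ∀ (hjl : j < f.length), f[j]'hjl ≠ m := by
        intro j hj hjl
        cases j with
        | zero =>
          intro h
          exact hmz (by rw [← h, hf0])
        | succ j' =>
          have h2 : j' < f.tail.length := by rw [List.length_tail]; omega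
          intro h
          apply hk1first j' (by omega)
          rw [List.getElem_tail]
          exact h
      have hk0N : ((k1 + 1 : Nat) : Int) < N := by omega
      rw [PySem.List.pyRange_one_append 1 ((k1 + 1 : Nat) : Int) N (by omega) (by omega),
        List.foldl_append, PySem.List.pyRange_one_cons hk0N, List.foldl_cons]
      have hmpos : 0 < m := lt_of_le_of_ne hm0 (Ne.symm hmz)
      have hsum := selFold_sum_gt N m f (PySem.List.pyRange 1 ((k1 + 1 : Nat) : Int) 1) ((N - 1, 1))
        (by
          intro i hi
          obtain ⟨h1, h2⟩ := PySem.List.mem_pyRange_one.1 hi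
          rw [hread i h1 (by omega)]
          have hlt : i.toNat < k1 + 1 := by omega
          exact lt_of_le_of_ne (hub _ (htailmem i.toNat (by omega) (by omega)))
            (hk0first i.toNat hlt (by omega)))
        (by simp; omega)
      have hreadk0 : PySem.List.pyGetD f ((k1 + 1 : Nat) : Int) 0 = m := by
        rw [hread ((k1 + 1 : Nat) : Int) (by omega) hk0N]
        simpa using hk0val
      have hstep : selStep N f
          ((PySem.List.pyRange 1 ((k1 + 1 : Nat) : Int) 1).foldl (selStep N f) (N - 1, 1))
          ((k1 + 1 : Nat) : Int)
          = (N - 1 - ((k1 + 1 : Nat) : Int), ((k1 + 1 : Nat) : Int) - m + 1) := by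
        simp only [selStep, hreadk0]
        rw [if_pos (by omega)]
      rw [hstep]
      rw [selFold_fix N m f _ _
        (by
          intro i hi
          obtain ⟨h1, h2⟩ := PySem.List.mem_pyRange_one.1 hi
          exact hle i (PySem.List.mem_pyRange_one.2 ⟨by omega, h2⟩))
        (by ring)]
      rw [hk1eq]
      simp only [Option.getD_some]
      constructor

theorem solve_eq_selFold (arr : List Int) (N : Int) :
    solve arr N = (PySem.List.pyRange 1 N 1).foldl (selStep N (failTable arr N)) (N - 1, 1) := by
  by_cases h : N ≤ 1
  · unfold solve
    rw [PySem.List.pyRange_one_eq_nil h]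
    rfl
  · exact foldA_eq_selFold arr N N (by omega) (le_refl N)

-- ===== the prefix function (longest proper border), and KMP correctness =====

-- L is a (proper) border of the prefix of length i+1, stated elementwise over getD
def brdP (a : List Int) (i L : Nat) : Prop :=
  L ≤ i ∧ ∀ t, t < L → a.getD t 0 = a.getD (i + 1 - L + t) 0

def brdB (a : List Int) (i L : Nat) : Bool :=
  decide (L ≤ i) && (List.range L).all (fun t => a.getD t 0 == a.getD (i + 1 - L + t) 0)

theorem brdB_iff (a : List Int) (i L : Nat) : brdB a i L = true ↔ brdP a i L := by
  simp [brdB, brdP, List.all_eq_true, List.mem_range]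

-- greatest L ≤ n with brdP a i L (0 if none): the naive downward search
def pfAux (a : List Int) (i : Nat) : Nat → Nat
  | 0 => 0
  | L + 1 => if brdB a i (L + 1) then L + 1 else pfAux a i L

def pf (a : List Int) (i : Nat) : Nat := pfAux a i i

theorem pfAux_succ (a : List Int) (i n : Nat) :
    pfAux a i (n + 1) = if brdB a i (n + 1) then n + 1 else pfAux a i n := rfl

theorem brdP_zero (a : List Int) (i : Nat) : brdP a i 0 :=
  ⟨Nat.zero_le _, fun t ht => absurd ht (by omega)⟩

theorem pfAux_le (a : List Int) (i : Nat) : ∀ n, pfAux a i n ≤ n := by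
  intro n
  induction n with
  | zero => simp [pfAux]
  | succ n ih => rw [pfAux_succ]; split <;> omega

theorem pfAux_brdP (a : List Int) (i : Nat) : ∀ n, brdP a i (pfAux a i n) := by
  intro n
  induction n with
  | zero => exact brdP_zero a i
  | succ n ih =>
    rw [pfAux_succ]
    by_cases h : brdB a i (n + 1)
    · rw [if_pos h]; exact (brdB_iff a i (n + 1)).1 h
    · rw [if_neg h]; exact ih

theorem le_pfAux (a : List Int) (i : Nat) : ∀ n L, brdP a i L → L ≤ n → L ≤ pfAux a i n := by
  intro n
  induction n with
  | zero => intro L _ h; omega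
  | succ n ih =>
    intro L hb hLn
    rw [pfAux_succ]
    by_cases h : brdB a i (n + 1)
    · rw [if_pos h]; omega
    · rw [if_neg h]
      rcases Nat.lt_or_ge L (n + 1) with hlt | hge
      · exact ih L hb (by omega)
      · have hL : L = n + 1 := by omega
        subst hL
        exact absurd ((brdB_iff a i (n + 1)).2 hb) h

theorem pf_le (a : List Int) (i : Nat) : pf a i ≤ i := pfAux_le a i i
theorem pf_brdP (a : List Int) (i : Nat) : brdP a i (pf a i) := pfAux_brdP a i i
theorem le_pf (a : List Int) (i L : Nat) (hb : brdP a i L) : L ≤ pf a i :=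
  le_pfAux a i i L hb hb.1

theorem pf_eq_of (a : List Int) (i K : Nat) (hb : brdP a i K)
    (hmax : ∀ L, brdP a i L → L ≤ K) : pf a i = K :=
  Nat.le_antisymm (hmax _ (pf_brdP a i)) (le_pf a i K hb)

theorem pf_zero (a : List Int) : pf a 0 = 0 := rfl

-- smaller borders of the same prefix are borders of the larger border's prefix
theorem brdP_nest (a : List Int) (i j L : Nat) (hL : brdP a i L) (hj : brdP a i j)
    (hlt : L < j) : brdP a (j - 1) L := by
  obtain ⟨hLi, hLe⟩ := hL
  obtain ⟨hji, hje⟩ := hj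
  refine ⟨by omega, fun t ht => ?_⟩
  have h2 := hje (j - L + t) (by omega)
  rw [show i + 1 - j + (j - L + t) = i + 1 - L + t by omega] at h2
  rw [show j - 1 + 1 - L + t = j - L + t by omega]
  exact (hLe t ht).trans h2.symm

-- a border of a border is a border
theorem brdP_trans (a : List Int) (i j L : Nat) (hj : brdP a i j) (hL : brdP a (j - 1) L)
    (hj1 : 1 ≤ j) : brdP a i L := by
  obtain ⟨hji, hje⟩ := hj
  obtain ⟨hLj, hLe⟩ := hL
  refine ⟨by omega, fun t ht => ?_⟩
  have h1 := hLe t ht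
  rw [show j - 1 + 1 - L + t = j - L + t by omega] at h1
  have h2 := hje (j - L + t) (by omega)
  rw [show i + 1 - j + (j - L + t) = i + 1 - L + t by omega] at h2
  exact h1.trans h2

-- extending a border by one matching character
theorem brdP_succ_iff (a : List Int) (i L : Nat) (hi : 1 ≤ i) (hLi : L + 1 ≤ i) :
    brdP a i (L + 1) ↔ (brdP a (i - 1) L ∧ a.getD L 0 = a.getD i 0) := by
  constructor
  · rintro ⟨-, he⟩
    refine ⟨⟨by omega, fun t ht => ?_⟩, ?_⟩
    · have h := he t (by omega)
      rwa [show i + 1 - (L + 1) + t = i - 1 + 1 - L + t by omega] at h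
    · have h := he L (by omega)
      rwa [show i + 1 - (L + 1) + L = i by omega] at h
  · rintro ⟨⟨-, he⟩, hm⟩
    refine ⟨by omega, fun t ht => ?_⟩
    rcases Nat.lt_or_ge t L with h | h
    · have h1 := he t h
      rwa [show i - 1 + 1 - L + t = i + 1 - (L + 1) + t by omega] at h1
    · have ht' : t = L := by omega
      subst ht'
      rw [show i + 1 - (t + 1) + t = i by omega]
      exact hm

-- pyGetD at a nonnegative Int index is getD at the Nat index
theorem pyGetD_toNat (xs : List Int) (i : Int) (hi : 0 ≤ i) :
    PySem.List.pyGetD xs i 0 = xs.getD i.toNat 0 := by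
  have h : PySem.List.pyGetD xs ((i.toNat : Nat) : Int) 0 = xs.getD i.toNat 0 :=
    PySem.List.pyGetD_natCast xs i.toNat 0
  rwa [show ((i.toNat : Nat) : Int) = i by omega] at h

-- the KMP while-loop walks the border chain: its result is the longest matching border
theorem pvWhile_spec (arr fl : List Int) (i1 : Nat) (hi1 : 1 ≤ i1)
    (Hfl : ∀ t, t < i1 → fl.getD t 0 = (pf arr t : Int)) :
    ∀ (n : Nat) (j : Int), 0 ≤ j → j.toNat ≤ n → brdP arr (i1 - 1) j.toNat →
      0 ≤ pvWhile arr fl (arr.getD i1 0) n j ∧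
      brdP arr (i1 - 1) (pvWhile arr fl (arr.getD i1 0) n j).toNat ∧
      (pvWhile arr fl (arr.getD i1 0) n j = 0 ∨
        arr.getD i1 0 = arr.getD (pvWhile arr fl (arr.getD i1 0) n j).toNat 0) ∧
      (∀ L, L ≤ j.toNat → brdP arr (i1 - 1) L → arr.getD L 0 = arr.getD i1 0 →
        (L : Int) ≤ pvWhile arr fl (arr.getD i1 0) n j) := by
  intro n
  induction n with
  | zero =>
    intro j hj0 hjn hjb
    have hj : j = 0 := by omega
    subst hj
    refine ⟨le_refl 0, by simpa using hjb, Or.inl rfl, ?_⟩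
    intro L hL _ _
    have : L = 0 := by omega
    simp [this, pvWhile]
  | succ n ih =>
    intro j hj0 hjn hjb
    unfold pvWhile
    by_cases hc : 0 < j ∧ arr.getD i1 0 ≠ PySem.List.pyGetD arr j 0
    · rw [if_pos hc]
      -- chase the chain: j ← fail[j-1] = pf (j-1)
      have hjt1 : 1 ≤ j.toNat := by omega
      have hjle : j.toNat ≤ i1 - 1 := hjb.1
      have hjlt : j.toNat - 1 < i1 := by omega
      have hread : PySem.List.pyGetD fl (j - 1) 0 = (pf arr (j.toNat - 1) : Int) := by
        rw [pyGetD_toNat fl (j - 1) (by omega), show (j - 1).toNat = j.toNat - 1 by omega]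
        exact Hfl (j.toNat - 1) hjlt
      rw [hread]
      have hjb' : brdP arr (i1 - 1) ((pf arr (j.toNat - 1) : Int)).toNat := by
        rw [Int.toNat_natCast]
        exact brdP_trans arr (i1 - 1) j.toNat (pf arr (j.toNat - 1)) hjb
          (pf_brdP arr (j.toNat - 1)) hjt1
      have hfuel : ((pf arr (j.toNat - 1) : Int)).toNat ≤ n := by
        rw [Int.toNat_natCast]
        have := pf_le arr (j.toNat - 1)
        omega
      obtain ⟨r0, rb, rm, rc⟩ := ih ((pf arr (j.toNat - 1) : Int)) (by positivity) hfuel hjb'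
      refine ⟨r0, rb, rm, ?_⟩
      intro L hL hLb hLm
      rcases Nat.lt_or_ge L j.toNat with hlt | hge
      · -- L < j: it is a border of the j-prefix, hence ≤ pf (j-1); recurse
        rcases Nat.eq_zero_or_pos L with h0 | h1
        · subst h0; simpa using r0
        · have hnest : brdP arr (j.toNat - 1) L := brdP_nest arr (i1 - 1) j.toNat L hLb hjb hlt
          have hLpf : L ≤ pf arr (j.toNat - 1) := le_pf arr (j.toNat - 1) L hnest
          exact rc L (by rw [Int.toNat_natCast]; exact hLpf) hLb hLm
      · -- L = j is impossible: the loop ran because arr[i] ≠ arr[j]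
        have hLj : L = j.toNat := by omega
        exfalso
        apply hc.2
        rw [pyGetD_toNat arr j (by omega), ← hLj]
        exact hLm.symm
    · rw [if_neg hc]
      rw [not_and_or, not_not, Int.not_lt] at hc
      refine ⟨hj0, hjb, ?_, ?_⟩
      · rcases Int.lt_or_le 0 j with h | h
        · right
          rw [← pyGetD_toNat arr j (by omega)]
          rcases hc with hc | hc
          · omega
          · exact hc
        · left; omega
      · intro L hL _ _
        omega

-- invariant of A's table construction: j and the written entries are prefix-function values
def InvK (arr : List Int) (N : Int) (i : Int) (s : Int × List Int) : Prop :=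
  s.1 = (pf arr (i.toNat - 1) : Int) ∧
  s.2.length = N.toNat ∧
  (∀ t, t < i.toNat → s.2.getD t 0 = (pf arr t : Int)) ∧
  (∀ t, i.toNat ≤ t → s.2.getD t 0 = 0)

theorem getD_set_self (l : List Int) (n : Nat) (v : Int) (h : n < l.length) :
    (l.set n v).getD n 0 = v := by
  rw [List.getD_eq_getElem?_getD, List.getElem?_set_self h]
  rfl

theorem getD_set_ne (l : List Int) (n m : Nat) (v : Int) (h : n ≠ m) :
    (l.set n v).getD m 0 = l.getD m 0 := by
  rw [List.getD_eq_getElem?_getD, List.getElem?_set_ne h, ← List.getD_eq_getElem?_getD]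

theorem stepB_invK (arr : List Int) (N : Int) (i : Int) (s : Int × List Int)
    (h : InvK arr N i s) (h1 : 1 ≤ i) (hiN : i < N) : InvK arr N (i + 1) (stepB arr s i) := by
  obtain ⟨hj, hlen, hset, hzero⟩ := h
  have hi11 : 1 ≤ i.toNat := by omega
  have hi1N : i.toNat < N.toNat := by omega
  have hai : PySem.List.pyGetD arr i 0 = arr.getD i.toNat 0 := pyGetD_toNat arr i (by omega)
  have hj0 : 0 ≤ s.1 := by rw [hj]; positivity
  have hjval : s.1.toNat = pf arr (i.toNat - 1) := by rw [hj]; simp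
  obtain ⟨hr0, hrb, hrm, hrc⟩ := pvWhile_spec arr s.2 i.toNat hi11
    (fun t ht => hset t (by omega)) s.1.toNat s.1 hj0 (le_refl _)
    (by rw [hjval]; exact pf_brdP arr (i.toNat - 1))
  have hrc' : ∀ L, brdP arr (i.toNat - 1) L → arr.getD L 0 = arr.getD i.toNat 0 →
      (L : Int) ≤ pvWhile arr s.2 (arr.getD i.toNat 0) s.1.toNat s.1 := by
    intro L hLb hLm
    exact hrc L (by rw [hjval]; exact le_pf arr (i.toNat - 1) L hLb) hLb hLm
  simp only [stepB, hai]
  set r := pvWhile arr s.2 (arr.getD i.toNat 0) s.1.toNat s.1 with hrdef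
  have hi1eq : (i + 1).toNat - 1 = i.toNat := by omega
  have hrle : r.toNat ≤ i.toNat - 1 := hrb.1
  by_cases hmatch : arr.getD i.toNat 0 = PySem.List.pyGetD arr r 0
  · rw [if_pos hmatch]
    have hm' : arr.getD r.toNat 0 = arr.getD i.toNat 0 := by
      rw [← pyGetD_toNat arr r hr0]
      exact hmatch.symm
    have hpf : pf arr i.toNat = r.toNat + 1 := by
      refine pf_eq_of arr i.toNat (r.toNat + 1)
        ((brdP_succ_iff arr i.toNat r.toNat hi11 (by omega)).2 ⟨hrb, hm'⟩) ?_
      intro L hLb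
      cases L with
      | zero => omega
      | succ L' =>
        obtain ⟨hb', hm2⟩ := (brdP_succ_iff arr i.toNat L' hi11 hLb.1).1 hLb
        have := hrc' L' hb' hm2
        omega
    refine ⟨?_, ?_, ?_, ?_⟩
    · dsimp only
      rw [hi1eq, hpf]
      push_cast
      omega
    · dsimp only
      rw [PySem.List.pySetD_of_nonneg _ _ (by omega : (0:Int) ≤ i)]
      simpa using hlen
    · dsimp only
      intro t ht
      rw [PySem.List.pySetD_of_nonneg _ _ (by omega : (0:Int) ≤ i)]
      rcases Nat.lt_or_ge t i.toNat with hlt | hge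
      · rw [getD_set_ne _ _ _ _ (by omega)]
        exact hset t hlt
      · have hti : t = i.toNat := by omega
        subst hti
        rw [getD_set_self _ _ _ (by omega), hpf]
        push_cast
        omega
    · dsimp only
      intro t ht
      rw [PySem.List.pySetD_of_nonneg _ _ (by omega : (0:Int) ≤ i),
        getD_set_ne _ _ _ _ (by omega)]
      exact hzero t (by omega)
  · rw [if_neg hmatch]
    have hr00 : r = 0 := by
      rcases hrm with h | h
      · exact h
      · exact absurd (by rw [pyGetD_toNat arr r hr0]; exact h) hmatch
    have hpf : pf arr i.toNat = 0 := by
      refine pf_eq_of arr i.toNat 0 (brdP_zero arr i.toNat) ?_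
      intro L hLb
      cases L with
      | zero => omega
      | succ L' =>
        obtain ⟨hb', hm2⟩ := (brdP_succ_iff arr i.toNat L' hi11 hLb.1).1 hLb
        have hL' := hrc' L' hb' hm2
        have hL'0 : L' = 0 := by omega
        subst hL'0
        exfalso
        apply hmatch
        rw [hr00, pyGetD_toNat arr 0 (le_refl 0)]
        exact hm2.symm
    refine ⟨?_, hlen, ?_, ?_⟩
    · dsimp only
      rw [hi1eq, hpf, hr00]
      rfl
    · dsimp only
      intro t ht
      rcases Nat.lt_or_ge t i.toNat with hlt | hge
      · exact hset t hlt
      · have hti : t = i.toNat := by omega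
        subst hti
        rw [hzero i.toNat (le_refl _), hpf]
        rfl
    · dsimp only
      intro t ht
      exact hzero t (by omega)

theorem foldB_invK (arr : List Int) (N b : Int) (hb1 : 1 ≤ b) (hbN : b ≤ N) :
    InvK arr N b ((PySem.List.pyRange 1 b 1).foldl (stepB arr) (0, List.replicate N.toNat 0)) := by
  induction b, hb1 using Int.le_induction with
  | base =>
    rw [PySem.List.pyRange_one_eq_nil (le_refl 1)]
    refine ⟨by simp [pf_zero], by simp, ?_, ?_⟩
    · intro t ht
      have ht0 : t = 0 := by omega
      subst ht0
      rw [pf_zero]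
      simp [List.getD_eq_getElem?_getD, List.getElem?_replicate]
      split <;> rfl
    · intro t _
      simp [List.getD_eq_getElem?_getD, List.getElem?_replicate]
      split <;> rfl
  | succ b hb ih =>
    rw [PySem.List.pyRange_one_succ_right hb, List.foldl_append]
    simp only [List.foldl_cons, List.foldl_nil]
    exact stepB_invK arr N b _ (ih (by omega)) hb (by omega)

-- ===== B's naive search computes the same prefix function =====

theorem take_eq_drop_take_iff (a : List Int) (i1 L : Nat) (hL1 : 1 ≤ L) (hLi : L ≤ i1)
    (hi : i1 < a.length) :
    (a.take L = (a.drop (i1 - L + 1)).take L) ↔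
      (∀ t, t < L → a.getD t 0 = a.getD (i1 + 1 - L + t) 0) := by
  constructor
  · intro h t ht
    have ht1 : t < a.length := by omega
    have ht2 : i1 + 1 - L + t < a.length := by omega
    rw [List.getD_eq_getElem a 0 ht1, List.getD_eq_getElem a 0 ht2]
    calc a[t] = (a.take L)[t]'(by simp; omega) := (List.getElem_take).symm
      _ = ((a.drop (i1 - L + 1)).take L)[t]'(by simp; omega) := List.getElem_of_eq h _
      _ = (a.drop (i1 - L + 1))[t]'(by simp; omega) := List.getElem_take
      _ = a[(i1 - L + 1) + t]'(by omega) := List.getElem_drop ..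
      _ = a[i1 + 1 - L + t] := by congr 1; omega
  · intro h
    apply List.ext_getElem
    · simp
      omega
    · intro k hk1 hk2
      have hkL : k < L := by simp at hk1; omega
      have h1 := h k hkL
      rw [List.getD_eq_getElem a 0 (by omega), List.getD_eq_getElem a 0 (by omega)] at h1
      calc (a.take L)[k]'hk1 = a[k]'(by omega) := List.getElem_take
        _ = a[i1 + 1 - L + k]'(by omega) := h1
        _ = a[(i1 - L + 1) + k]'(by omega) := by congr 1; omega
        _ = (a.drop (i1 - L + 1))[k]'(by simp; omega) := (List.getElem_drop ..).symm
        _ = ((a.drop (i1 - L + 1)).take L)[k]'hk2 := (List.getElem_take).symm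

theorem borderLoop_eq (arr : List Int) (i1 : Nat) (_hi1 : 1 ≤ i1) (hlen : i1 < arr.length) :
    ∀ n, n ≤ i1 → borderLoop arr (i1 : Int) n = (pfAux arr i1 n : Int) := by
  intro n
  induction n with
  | zero => intro _; rfl
  | succ n ih =>
    intro hn
    have hcond : (PySem.List.slice arr none (some ((n : Int) + 1)) =
        PySem.List.slice arr (some ((i1 : Int) - ((n : Int) + 1) + 1)) (some ((i1 : Int) + 1)))
        ↔ brdP arr i1 (n + 1) := by
      rw [show ((n : Int) + 1) = (((n + 1 : Nat)) : Int) by omega,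
        show ((i1 : Int) - (((n + 1 : Nat)) : Int) + 1) = (((i1 - (n + 1) + 1 : Nat)) : Int) by omega,
        show ((i1 : Int) + 1) = (((i1 + 1 : Nat)) : Int) by omega,
        PySem.List.slice_to_natCast, PySem.List.slice_natCast,
        show (i1 + 1) - (i1 - (n + 1) + 1) = n + 1 by omega]
      constructor
      · intro h
        exact ⟨by omega, (take_eq_drop_take_iff arr i1 (n + 1) (by omega) (by omega) hlen).1 h⟩
      · intro h
        exact (take_eq_drop_take_iff arr i1 (n + 1) (by omega) (by omega) hlen).2 h.2
    simp only [borderLoop, pfAux_succ]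
    by_cases hb : brdP arr i1 (n + 1)
    · rw [if_pos (hcond.2 hb), if_pos ((brdB_iff arr i1 (n + 1)).2 hb)]
      omega
    · rw [if_neg (fun h => hb (hcond.1 h)),
        if_neg (fun h => hb ((brdB_iff arr i1 (n + 1)).1 h))]
      exact ih (by omega)

theorem border_eq (arr : List Int) (i : Int) (h1 : 1 ≤ i) (hlen : i < (arr.length : Int)) :
    border arr i = (pf arr i.toNat : Int) := by
  have h := borderLoop_eq arr i.toNat (by omega) (by omega) i.toNat (le_refl _)
  rw [show ((i.toNat : Nat) : Int) = i by omega] at h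
  unfold border pf
  exact h

-- the tail of A's failure table is exactly B's border list
theorem tail_failTable_eq (arr : List Int) (N : Int) (h2 : 2 ≤ N)
    (hlen : N ≤ (arr.length : Int)) :
    (failTable arr N).tail = (PySem.List.pyRange 1 N 1).map (border arr) := by
  obtain ⟨-, hlen2, hset, -⟩ := foldB_invK arr N N (by omega) (le_refl N)
  have hlenF : (failTable arr N).length = N.toNat := hlen2
  apply List.ext_getElem
  · rw [List.length_tail, hlenF, List.length_map, PySem.List.length_pyRange_one]
    omega
  · intro k hk1 hk2
    have hkN : k + 1 < N.toNat := by
      rw [List.length_tail, hlenF] at hk1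
      omega
    calc (failTable arr N).tail[k]'hk1
        = (failTable arr N)[k + 1]'(by omega) := List.getElem_tail ..
      _ = (failTable arr N).getD (k + 1) 0 := (List.getD_eq_getElem _ 0 (by omega)).symm
      _ = (pf arr (k + 1) : Int) := hset (k + 1) hkN
      _ = border arr (1 + (k : Int)) := by
          rw [border_eq arr (1 + (k : Int)) (by omega) (by omega),
            show (1 + (k : Int)).toNat = k + 1 by omega]
      _ = border arr ((PySem.List.pyRange 1 N 1)[k]'(by
            rw [PySem.List.length_pyRange_one]; omega)) := by
          rw [PySem.List.getElem_pyRange_one]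
      _ = ((PySem.List.pyRange 1 N 1).map (border arr))[k]'hk2 := (List.getElem_map ..).symm

-- ===== VERDICT (by name: the statement is the Claim_ definition above) =====
theorem solve_spec : Claim_equal_solve := by
  intro arr N _ hpre
  unfold Spec_solve
  by_cases hN : N ≤ 1
  · unfold solve solve_alt
    rw [PySem.List.pyRange_one_eq_nil hN]
    simp [PySem.List.maxD, PySem.List.max?]
  · have hlen : N ≤ (arr.length : Int) := by
      rcases hpre with h | h
      · omega
      · exact h
    rw [solve_eq_selFold]
    obtain ⟨hlenf, hpos, h0⟩ := failTable_inv arr N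
    rw [selFold_eq_select N (failTable arr N) hlenf hpos h0]
    rw [tail_failTable_eq arr N (by omega) hlen]
    rfl
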